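-- pv_equiv track=rewrite | github.com/modemobpsycho/python-course-s1-2 | 7. functions/4. field-of-view/task4.py | get_word_indices
-- ===== SOURCE A (Python) =====
-- def get_word_indices(strings: list[str]) -> dict:
--   '''Функция возвращает словарь, где ключи — это уникальные слова из
--   списка строк в нижнем регистре, а значения —
--   это списки индексов строк, в которых эти слова встречаются'''
--   dct = {j: 0 for i in strings for j in i.lower().split()}
--   for i in dct:
--     z = []
--     for j in range(len(strings)):
--       if i in strings[j].lower():
--         z.append(j)
--     dct[i] = (z)
--   return dct
-- ===== SOURCE B (Python) =====
-- def get_word_indices(strings: list[str]) -> dict: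
--     '''Same result as A: unique lowercased words (first-occurrence order) ->
--     ascending indices of strings whose lowercase form contains the word.
--     Algorithm: instead of a substring-containment test per (word, string) pair,
--     slide fixed-length windows (one length per distinct word length) over each
--     string once and look each window up in a hash set of the words.'''
--     lows = [s.lower() for s in strings]
--     res = {}
--     for low in lows:
--         for w in low.split():
--             res.setdefault(w, [])
--     words = set(res)
--     lengths = sorted({len(w) for w in res})
--     for j, low in enumerate(lows):
--         n = len(low)
--         hits = set()
--         for i in range(n + 1):
--             for L in lengths:
--                 if i + L <= n:
--                     sub = low[i:i + L]
--                     if sub in words: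
--                         hits.add(sub)
--         for w in res:
--             if w in hits:
--                 res[w].append(j)
--     return res
-- ===== Notes on version B (the rewrite author's own statement) =====
-- stated objective: alternative
-- what changed: B replaces A's per-(word,string) substring-containment scans with multi-pattern matching: it slides fixed-length windows (one per distinct word length) over each lowercased string once and looks each window up in a hash set of the words, collecting per-string hits; no substring-containment test remains.
import Mathlib
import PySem

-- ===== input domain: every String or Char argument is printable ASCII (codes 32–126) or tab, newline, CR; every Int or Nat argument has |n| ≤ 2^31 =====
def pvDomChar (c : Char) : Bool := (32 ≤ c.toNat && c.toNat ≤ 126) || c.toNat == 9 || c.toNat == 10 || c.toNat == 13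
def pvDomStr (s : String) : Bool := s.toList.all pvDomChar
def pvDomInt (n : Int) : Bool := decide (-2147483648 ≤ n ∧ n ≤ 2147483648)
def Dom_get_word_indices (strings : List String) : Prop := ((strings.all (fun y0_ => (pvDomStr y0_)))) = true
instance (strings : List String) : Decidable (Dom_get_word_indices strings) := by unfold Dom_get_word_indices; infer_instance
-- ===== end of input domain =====

-- B replaces A's per-(word,string) substring-containment scans with multi-pattern matching:
-- fixed-length windows (one per distinct word length) slide over each lowercased string once
-- and each window is looked up in a set of the words; same return value.

-- ===== PORT A =====
-- Python's dict comprehension initialises every value to the int 0; every key's value is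
-- overwritten with its index list before the return, so the placeholder here is [] : List Int.
def get_word_indices (strings : List String) : List (String × List Int) :=
  let dct : PySem.Dict String (List Int) :=
    strings.foldl (fun d i =>
      (PySem.Str.split₀ (PySem.Str.lower i)).foldl (fun d j => d.insert j []) d)
      PySem.Dict.empty
  (dct.keys.foldl (fun d i =>
    let z := (PySem.List.pyRange 0 (PySem.List.len strings) 1).foldl (fun z j =>
      if PySem.Str.isIn i (PySem.Str.lower (PySem.List.pyGetD strings j "")) then z ++ [j]
      else z) []
    d.insert i z) dct).items

-- ===== PORT B =====
-- the per-string hit set: windows low[i:i+L] for each distinct word length L, looked up in `words`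
def pvHitsB (lengths : List Int) (words : PySem.Set String) (low : String) : PySem.Set String :=
  (PySem.List.pyRange 0 (PySem.Str.len low + 1) 1).foldl (fun hits i =>
    lengths.foldl (fun hits L =>
      if i + L ≤ PySem.Str.len low then
        let sub := PySem.Str.slice low (some i) (some (i + L))
        if PySem.Set.contains words sub then PySem.Set.add hits sub else hits
      else hits) hits) PySem.Set.empty

def get_word_indices_alt (strings : List String) : List (String × List Int) :=
  let lows := strings.map PySem.Str.lower
  let res : PySem.Dict String (List Int) :=
    lows.foldl (fun d low =>
      (PySem.Str.split₀ low).foldl (fun d w => d.setdefault w []) d)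
      PySem.Dict.empty
  let words : PySem.Set String := PySem.Set.ofList res.keys
  let lengths : List Int :=
    PySem.List.sorted (PySem.Set.ofList (res.keys.map PySem.Str.len)) (fun x => x) false
  ((PySem.List.enumerate lows).foldl (fun d p =>
    let hits := pvHitsB lengths words p.2
    d.keys.foldl (fun d w =>
      if PySem.Set.contains hits w then d.modify w [] (fun z => z ++ [p.1]) else d) d) res).items

-- ===== PRECONDITION & SPEC =====
def Spec_get_word_indices (strings : List String) (out : List (String × List Int)) : Prop := out = get_word_indices_alt strings
instance (strings : List String) (out : List (String × List Int)) : Decidable (Spec_get_word_indices strings out) := by unfold Spec_get_word_indices; infer_instance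

-- ===== CLAIM (what is proved, stated in full; the proofs are below) =====
def Claim_equal_get_word_indices : Prop := ∀ (strings : List String), Dom_get_word_indices strings → Spec_get_word_indices strings (get_word_indices strings)

-- ===== LEMMAS AND PROOFS =====

-- the deduplicated lowercased words, in first-occurrence order (the keys of both dicts)
def pvWords (strings : List String) : List String :=
  PySem.Set.ofList (strings.flatMap (fun s => PySem.Str.split₀ (PySem.Str.lower s)))

-- A's per-word index list
def pvZ (strings : List String) (w : String) : List Int :=
  (PySem.List.pyRange 0 (PySem.List.len strings) 1).filter
    (fun j => PySem.Str.isIn w (PySem.Str.lower (PySem.List.pyGetD strings j "")))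

theorem pv_update_self (s : List String) : PySem.Set.update s s = s := by
  rw [PySem.Set.update_eq_append_filter]
  have h : (List.filter (fun y => !PySem.Set.contains s y) (PySem.Set.ofList s)) = [] := by
    apply List.filter_eq_nil_iff.mpr
    intro y hy
    have hm : y ∈ s := (PySem.Set.mem_ofList s y).mp hy
    simp [PySem.Set.contains, hm]
  rw [h, List.append_nil]

-- getD after a fold of key-dependent inserts
theorem pv_getD_foldl_insert_fn (z : String → List Int) (l : List String) :
    ∀ (d : PySem.Dict String (List Int)) (w : String),
      (l.foldl (fun d i => d.insert i (z i)) d).getD w [] =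
        if w ∈ l then z w else d.getD w [] := by
  induction l with
  | nil => intro d w; simp
  | cons x t ih =>
    intro d w
    simp only [List.foldl_cons]
    rw [ih]
    by_cases hw : w ∈ t
    · simp [hw]
    · by_cases hx : w = x
      · subst hx; simp [hw]
      · simp [hw, hx, PySem.Dict.getD_insert]

-- getD is untouched by a setdefault-with-[] fold (values are only ever created as [])
theorem pv_getD_foldl_setdefault (l : List String) :
    ∀ (d : PySem.Dict String (List Int)) (w : String),
      (l.foldl (fun d x => d.setdefault x []) d).getD w [] = d.getD w [] := by
  induction l with
  | nil => intro d w; simp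
  | cons x t ih =>
    intro d w
    simp only [List.foldl_cons]
    rw [ih]
    by_cases hx : w = x
    · subst hx; exact PySem.Dict.getD_setdefault_self d w [] []
    · rw [PySem.Dict.getD_eq_get?_getD, PySem.Dict.get?_setdefault_of_ne d [] hx,
        ← PySem.Dict.getD_eq_get?_getD]

theorem pv_keys_foldl_setdefault (l : List String) :
    ∀ (d : PySem.Dict String (List Int)),
      (l.foldl (fun d x => d.setdefault x ([] : List Int)) d).keys =
        PySem.Set.update d.keys l := by
  induction l with
  | nil => intro d; simp [PySem.Set.update_nil]
  | cons x t ih =>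
    intro d
    simp only [List.foldl_cons]
    rw [ih, PySem.Set.update_cons]
    congr 1
    rw [PySem.Dict.keys_setdefault]
    by_cases hc : d.contains x = true
    · have hm : x ∈ d.keys := (PySem.Dict.contains_iff_mem_keys d x).mp hc
      simp [hc, PySem.Set.add, PySem.Set.contains, hm]
    · have hm : x ∉ d.keys := fun hmem => hc ((PySem.Dict.contains_iff_mem_keys d x).mpr hmem)
      simp [hc, PySem.Set.add, PySem.Set.contains, hm]

-- B's inner loop (one string, condition c, index j): keys unchanged
theorem pv_inner_keys (c : String → Bool) (j : Int) (l : List String) :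
    ∀ (d : PySem.Dict String (List Int)), (∀ k ∈ l, d.contains k = true) →
      (l.foldl (fun d w =>
        if c w then d.modify w [] (fun z => z ++ [j]) else d) d).keys =
      d.keys := by
  induction l with
  | nil => intro d _; simp
  | cons x t ih =>
    intro d hc
    simp only [List.foldl_cons]
    by_cases hin : c x = true
    · have hcx : d.contains x = true := hc x (List.mem_cons_self)
      have hkeys : (d.modify x [] (fun z => z ++ [j])).keys = d.keys := by
        rw [PySem.Dict.keys_modify, PySem.Dict.keys_insert_of_contains _ _ hcx]
      rw [if_pos hin]
      rw [ih _ (fun k hk => by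
        rw [PySem.Dict.contains_modify]
        simp [hc k (List.mem_cons_of_mem _ hk)]), hkeys]
    · rw [if_neg hin]
      exact ih d (fun k hk => hc k (List.mem_cons_of_mem _ hk))

-- B's inner loop: effect on one value
theorem pv_inner_getD (c : String → Bool) (j : Int) (l : List String) :
    ∀ (d : PySem.Dict String (List Int)) (w : String), l.Nodup →
      (∀ k ∈ l, d.contains k = true) →
      (l.foldl (fun d w =>
        if c w then d.modify w [] (fun z => z ++ [j]) else d) d).getD w [] =
      if w ∈ l ∧ c w = true then d.getD w [] ++ [j] else d.getD w [] := by
  induction l with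
  | nil => intro d w _ _; simp
  | cons x t ih =>
    intro d w hnd hc
    have hxt : x ∉ t := (List.nodup_cons.mp hnd).1
    have hndt : t.Nodup := (List.nodup_cons.mp hnd).2
    simp only [List.foldl_cons]
    by_cases hin : c x = true
    · rw [if_pos hin]
      rw [ih _ _ hndt (fun k hk => by
        rw [PySem.Dict.contains_modify]
        simp [hc k (List.mem_cons_of_mem _ hk)])]
      by_cases hwx : w = x
      · subst hwx
        simp [hxt, hin]
      · by_cases hw : w ∈ t
        · simp [hw, hwx, PySem.Dict.getD_modify]
        · simp [hw, hwx, PySem.Dict.getD_modify]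
    · have hin' : c x = false := by simpa using hin
      rw [if_neg hin]
      rw [ih _ _ hndt (fun k hk => hc k (List.mem_cons_of_mem _ hk))]
      by_cases hwx : w = x
      · subst hwx
        simp [hxt, hin']
      · simp [hwx]

-- B's outer loop over the enumerated strings (condition cond p w per pair)
theorem pv_outer (cond : Int × String → String → Bool) (L : List (Int × String)) :
    ∀ (d : PySem.Dict String (List Int)), d.keys.Nodup →
      (L.foldl (fun d p =>
        d.keys.foldl (fun d w =>
          if cond p w then d.modify w [] (fun z => z ++ [p.1]) else d) d) d).keys =
        d.keys ∧
      ∀ w ∈ d.keys,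
        (L.foldl (fun d p =>
          d.keys.foldl (fun d w =>
            if cond p w then d.modify w [] (fun z => z ++ [p.1]) else d) d) d).getD w [] =
        d.getD w [] ++ (L.filter (fun p => cond p w)).map (fun p => p.1) := by
  induction L with
  | nil => intro d _; simp
  | cons p t ih =>
    intro d hnd
    have hcall : ∀ k ∈ d.keys, d.contains k = true :=
      fun k hk => (PySem.Dict.contains_iff_mem_keys d k).mpr hk
    have hk1 := pv_inner_keys (cond p) p.1 d.keys d hcall
    have hnd' : (d.keys.foldl (fun d w =>
        if cond p w then d.modify w [] (fun z => z ++ [p.1]) else d) d).keys.Nodup := by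
      rw [hk1]; exact hnd
    obtain ⟨ihk, ihg⟩ := ih _ hnd'
    simp only [List.foldl_cons]
    constructor
    · rw [ihk, hk1]
    · intro w hw
      rw [ihg w (by rw [hk1]; exact hw)]
      rw [pv_inner_getD (cond p) p.1 d.keys d w hnd hcall]
      by_cases hin : cond p w = true
      · simp [hw, hin]
      · have hin' : cond p w = false := by simpa using hin
        simp [hin']

-- A's result, in closed form
theorem pv_A_items (strings : List String) :
    get_word_indices strings = (pvWords strings).map (fun w => (w, pvZ strings w)) := by
  simp only [get_word_indices]
  set allW := strings.flatMap (fun s => PySem.Str.split₀ (PySem.Str.lower s)) with hallW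
  have hd : strings.foldl (fun d i =>
      (PySem.Str.split₀ (PySem.Str.lower i)).foldl (fun d j => d.insert j []) d)
      (PySem.Dict.empty (κ := String) (ν := List Int)) =
      allW.foldl (fun d j => d.insert j []) PySem.Dict.empty := List.foldl_flatMap.symm
  rw [hd]
  set dct := allW.foldl (fun d j => d.insert j ([] : List Int)) PySem.Dict.empty with hdct
  have hkeys : dct.keys = pvWords strings := by
    have h := PySem.Dict.keys_foldl_insert allW (fun _ _ => ([] : List Int)) PySem.Dict.empty
    simp only [PySem.Dict.keys_empty, PySem.Set.update_nil_left] at h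
    simpa [pvWords, hdct] using h
  have hnd : dct.keys.Nodup := by
    rw [hkeys]; exact PySem.Set.nodup_ofList _
  have hkeysF : (dct.keys.foldl (fun d i => d.insert i
      ((PySem.List.pyRange 0 (PySem.List.len strings) 1).foldl (fun z j =>
        if PySem.Str.isIn i (PySem.Str.lower (PySem.List.pyGetD strings j "")) then z ++ [j]
        else z) [])) dct).keys = dct.keys := by
    have h := PySem.Dict.keys_foldl_insert dct.keys
      (fun _ i => ((PySem.List.pyRange 0 (PySem.List.len strings) 1).foldl (fun z j =>
        if PySem.Str.isIn i (PySem.Str.lower (PySem.List.pyGetD strings j "")) then z ++ [j]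
        else z) [])) dct
    simpa [pv_update_self] using h
  have hfinal : (dct.keys.foldl (fun d i => d.insert i
      ((PySem.List.pyRange 0 (PySem.List.len strings) 1).foldl (fun z j =>
        if PySem.Str.isIn i (PySem.Str.lower (PySem.List.pyGetD strings j "")) then z ++ [j]
        else z) [])) dct).items = dct.keys.map (fun w => (w, pvZ strings w)) := by
    rw [PySem.Dict.items_eq_map_keys _ (by rw [hkeysF]; exact hnd) []]
    rw [hkeysF]
    apply List.map_congr_left
    intro w hmem
    have h := pv_getD_foldl_insert_fn
      (fun i => ((PySem.List.pyRange 0 (PySem.List.len strings) 1).foldl (fun z j =>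
        if PySem.Str.isIn i (PySem.Str.lower (PySem.List.pyGetD strings j "")) then z ++ [j]
        else z) [])) dct.keys dct w
    rw [if_pos hmem] at h
    rw [h]
    have hz := PySem.List.foldl_append_if
      (fun j => PySem.Str.isIn w (PySem.Str.lower (PySem.List.pyGetD strings j "")))
      (fun j => j) (PySem.List.pyRange 0 (PySem.List.len strings) 1) []
    simpa [pvZ] using hz
  rw [hfinal, hkeys]


-- membership through a set-building fold whose step adds (at most) one conditional element
theorem pv_mem_foldl_step {A : Type} (step : PySem.Set String → A → PySem.Set String)
    (cond : A → Prop) (x : String)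
    (hstep : ∀ (hits : PySem.Set String) (a : A), x ∈ step hits a ↔ x ∈ hits ∨ cond a) :
    ∀ (l : List A) (hits : PySem.Set String),
      x ∈ l.foldl step hits ↔ x ∈ hits ∨ ∃ a ∈ l, cond a := by
  intro l
  induction l with
  | nil => intro hits; simp
  | cons a t ih =>
    intro hits
    simp only [List.foldl_cons]
    rw [ih, hstep]
    simp only [List.mem_cons]
    constructor
    · rintro ((h | h) | ⟨b, hb, hc⟩)
      · exact Or.inl h
      · exact Or.inr ⟨a, Or.inl rfl, h⟩
      · exact Or.inr ⟨b, Or.inr hb, hc⟩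
    · rintro (h | ⟨b, (rfl | hb), hc⟩)
      · exact Or.inl (Or.inl h)
      · exact Or.inl (Or.inr hc)
      · exact Or.inr ⟨b, hb, hc⟩

-- membership in the per-string hit set
theorem pv_mem_hits (lengths : List Int) (words : PySem.Set String) (low x : String) :
    x ∈ pvHitsB lengths words low ↔
      ∃ i ∈ PySem.List.pyRange 0 (PySem.Str.len low + 1) 1, ∃ L ∈ lengths,
        i + L ≤ PySem.Str.len low ∧
        PySem.Set.contains words (PySem.Str.slice low (some i) (some (i + L))) = true ∧
        PySem.Str.slice low (some i) (some (i + L)) = x := by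
  unfold pvHitsB
  rw [pv_mem_foldl_step _ (fun i => ∃ L ∈ lengths,
      i + L ≤ PySem.Str.len low ∧
      PySem.Set.contains words (PySem.Str.slice low (some i) (some (i + L))) = true ∧
      PySem.Str.slice low (some i) (some (i + L)) = x) x ?_]
  · simp [PySem.Set.empty]
  · intro hits i
    rw [pv_mem_foldl_step _ (fun L =>
        i + L ≤ PySem.Str.len low ∧
        PySem.Set.contains words (PySem.Str.slice low (some i) (some (i + L))) = true ∧
        PySem.Str.slice low (some i) (some (i + L)) = x) x ?_]
    intro hits' L
    by_cases h1 : i + L ≤ PySem.Str.len low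
    · by_cases h2 : PySem.Set.contains words (PySem.Str.slice low (some i) (some (i + L))) = true
      · rw [if_pos h1, if_pos h2, PySem.Set.mem_add]
        constructor
        · rintro (h | rfl)
          · exact Or.inl h
          · exact Or.inr ⟨h1, h2, rfl⟩
        · rintro (h | ⟨_, _, rfl⟩)
          · exact Or.inl h
          · exact Or.inr rfl
      · rw [if_pos h1, if_neg h2]
        constructor
        · exact Or.inl
        · rintro (h | ⟨_, hc, _⟩)
          · exact h
          · exact absurd hc h2
    · rw [if_neg h1]
      constructor
      · exact Or.inl
      · rintro (h | ⟨hc, _, _⟩)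
        · exact h
        · exact absurd hc h1

-- the hit set knows exactly the words occurring as a substring
theorem pv_hits_iff_isIn (lengths : List Int) (words : PySem.Set String) (low w : String)
    (hw : w ∈ words) (hlen : PySem.Str.len w ∈ lengths) (hpos : ∀ L ∈ lengths, 0 ≤ L) :
    (w ∈ pvHitsB lengths words low) ↔ PySem.Str.isIn w low = true := by
  rw [pv_mem_hits, PySem.Str.isIn_eq, PySem.Chars.isIn_iff_infix]
  constructor
  · rintro ⟨i, hi, L, hL, hle, -, hslice⟩
    have h0i : 0 ≤ i := ((PySem.List.mem_pyRange_one).mp hi).1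
    have h0L : 0 ≤ L := hpos L hL
    have htl : PySem.List.slice low.toList (some i) (some (i + L)) = w.toList := by
      simpa [PySem.Str.slice] using congrArg String.toList hslice
    rw [PySem.List.slice_toNat low.toList h0i (by omega : (0:Int) ≤ i + L)] at htl
    rw [← htl]
    exact (List.take_prefix _ _).isInfix.trans (List.drop_suffix _ _).isInfix
  · intro hinf
    obtain ⟨j, hpre⟩ := (PySem.Chars.exists_prefix_drop_iff_isIn w.toList low.toList).mpr
      ((PySem.Chars.isIn_iff_infix _ _).mpr hinf)
    set n := low.toList.length with hn
    have hpre' : w.toList <+: low.toList.drop (min j n) := by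
      rcases le_total j n with hj | hj
      · simpa [min_eq_left hj] using hpre
      · have hnil : low.toList.drop j = [] := List.drop_eq_nil_of_le (by omega)
        have : w.toList = [] := List.prefix_nil.mp (hnil ▸ hpre)
        simp [this]
    have hlb : w.toList.length ≤ n - min j n := by
      have := hpre'.length_le
      simpa [List.length_drop] using this
    have hmin : min j n ≤ n := min_le_right _ _
    refine ⟨((min j n : Nat) : Int), ?_, PySem.Str.len w, hlen, ?_, ?_, ?_⟩
    · rw [PySem.List.mem_pyRange_one, PySem.Str.len_eq]
      constructor
      · positivity
      · push_cast; omega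
    · rw [PySem.Str.len_eq, PySem.Str.len_eq]
      push_cast; omega
    · have hsl : PySem.Str.slice low (some ((min j n : Nat) : Int))
          (some (((min j n : Nat) : Int) + PySem.Str.len w)) = w := by
        apply String.toList_inj.mp
        rw [PySem.Str.len_eq]
        simp only [PySem.Str.slice, String.toList_ofList, PySem.Chars.slice_eq_listSlice]
        rw [PySem.List.slice_natCast_add]
        exact (List.prefix_iff_eq_take.mp hpre').symm
      rw [hsl]
      exact (PySem.Set.contains_iff words w).mpr hw
    · apply String.toList_inj.mp
      rw [PySem.Str.len_eq]
      simp only [PySem.Str.slice, String.toList_ofList, PySem.Chars.slice_eq_listSlice]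
      rw [PySem.List.slice_natCast_add]
      exact (List.prefix_iff_eq_take.mp hpre').symm

-- B's result, in closed form
theorem pv_B_items (strings : List String) :
    get_word_indices_alt strings = (pvWords strings).map (fun w =>
      (w, ((PySem.List.enumerate (strings.map PySem.Str.lower)).filter
        (fun p => PySem.Set.contains (pvHitsB
          (PySem.List.sorted (PySem.Set.ofList ((pvWords strings).map PySem.Str.len)) (fun x => x) false)
          (PySem.Set.ofList (pvWords strings)) p.2) w)).map (fun p => p.1))) := by
  simp only [get_word_indices_alt]
  set lows := strings.map PySem.Str.lower with hlows
  have hflat : lows.flatMap PySem.Str.split₀ =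
      strings.flatMap (fun s => PySem.Str.split₀ (PySem.Str.lower s)) := by
    rw [hlows, List.flatMap_map]
  have hd : lows.foldl (fun d low =>
      (PySem.Str.split₀ low).foldl (fun d w => d.setdefault w []) d)
      (PySem.Dict.empty (κ := String) (ν := List Int)) =
      (lows.flatMap PySem.Str.split₀).foldl (fun d w => d.setdefault w []) PySem.Dict.empty :=
    List.foldl_flatMap.symm
  rw [hd, hflat]
  set allW := strings.flatMap (fun s => PySem.Str.split₀ (PySem.Str.lower s)) with hallW
  set d0 := allW.foldl (fun d w => d.setdefault w ([] : List Int)) PySem.Dict.empty with hd0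
  have hkeys : d0.keys = pvWords strings := by
    rw [hd0, pv_keys_foldl_setdefault allW PySem.Dict.empty, PySem.Dict.keys_empty,
      PySem.Set.update_nil_left, hallW, pvWords]
  rw [hkeys]
  have hnd : d0.keys.Nodup := by rw [hkeys]; exact PySem.Set.nodup_ofList _
  have hg0 : ∀ w, d0.getD w [] = [] := by
    intro w
    rw [hd0, pv_getD_foldl_setdefault allW PySem.Dict.empty w, PySem.Dict.getD_empty]
  obtain ⟨hkF, hgF⟩ := pv_outer (fun p w => PySem.Set.contains (pvHitsB
      (PySem.List.sorted (PySem.Set.ofList ((pvWords strings).map PySem.Str.len)) (fun x => x) false)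
      (PySem.Set.ofList (pvWords strings)) p.2) w) (PySem.List.enumerate lows) d0 hnd
  rw [PySem.Dict.items_eq_map_keys _ (by rw [hkF]; exact hnd) []]
  rw [hkF, hkeys]
  apply List.map_congr_left
  intro w hw
  have hmem : w ∈ d0.keys := by rw [hkeys]; exact hw
  rw [hgF w hmem, hg0 w]
  simp

-- the two per-word index lists coincide
theorem pv_Z_eq (strings : List String) (w : String) (hw : w ∈ pvWords strings) :
    pvZ strings w = ((PySem.List.enumerate (strings.map PySem.Str.lower)).filter
      (fun p => PySem.Set.contains (pvHitsB
        (PySem.List.sorted (PySem.Set.ofList ((pvWords strings).map PySem.Str.len)) (fun x => x) false)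
        (PySem.Set.ofList (pvWords strings)) p.2) w)).map (fun p => p.1) := by
  have base : pvZ strings w = ((PySem.List.enumerate (strings.map PySem.Str.lower)).filter
      (fun p => PySem.Str.isIn w p.2)).map (fun p => p.1) := by
    rw [PySem.List.enumerate_eq_map_pyRange (strings.map PySem.Str.lower) ""]
    rw [List.filter_map, List.map_map]
    have hget : ∀ j : Int, PySem.List.pyGetD (strings.map PySem.Str.lower) j "" =
        PySem.Str.lower (PySem.List.pyGetD strings j "") := by
      intro j
      have h := PySem.List.pyGetD_map PySem.Str.lower strings j ""
      simpa using h
    have hlen : PySem.List.len (strings.map PySem.Str.lower) = PySem.List.len strings := by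
      simp
    simp only [Function.comp_def, hget, hlen]
    unfold pvZ
    simp
  rw [base]
  congr 1
  apply List.filter_congr
  intro p _
  have hw' : w ∈ PySem.Set.ofList (pvWords strings) := (PySem.Set.mem_ofList _ _).mpr hw
  have hlenm : PySem.Str.len w ∈ PySem.List.sorted
      (PySem.Set.ofList ((pvWords strings).map PySem.Str.len)) (fun x => x) false := by
    rw [PySem.List.mem_sorted]
    exact (PySem.Set.mem_ofList _ _).mpr (List.mem_map_of_mem hw)
  have hpos : ∀ L ∈ PySem.List.sorted
      (PySem.Set.ofList ((pvWords strings).map PySem.Str.len)) (fun x => x) false, (0:Int) ≤ L := by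
    intro L hL
    rw [PySem.List.mem_sorted] at hL
    obtain ⟨w', -, rfl⟩ := List.mem_map.mp ((PySem.Set.mem_ofList _ _).mp hL)
    rw [PySem.Str.len_eq]
    positivity
  have h := pv_hits_iff_isIn _ _ p.2 w hw' hlenm hpos
  rw [Bool.eq_iff_iff, PySem.Set.contains_iff]
  exact h.symm

-- ===== VERDICT (by name: the statement is the Claim_ definition above) =====
theorem get_word_indices_spec : Claim_equal_get_word_indices := by
  intro strings _
  unfold Spec_get_word_indices
  rw [pv_A_items, pv_B_items]
  apply List.map_congr_left
  intro w hw
  rw [pv_Z_eq strings w hw]
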